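-- pv_equiv track=rewrite | github.com/edgarosovel/JarvisForMac | Main.py | obtener_operacion
-- ===== SOURCE A (Python) =====
-- def obtener_operacion(comando):
--     encontrado=False
--     lista=[]
--     for x in comando:
--         if encontrado:
--             lista.append(x)
--         if x == "es":
--             encontrado=True
--     return lista
-- ===== SOURCE B (Python) =====
-- def obtener_operacion(comando):
--     lst = list(comando)
--     if "es" in lst:
--         return lst[lst.index("es") + 1:]
--     return []
-- ===== Notes on version B (the rewrite author's own statement) =====
-- stated objective: idiomatic
-- what changed: Replaces the flag-accumulator loop with a locate-then-slice structure: find the first 'es' with list.index and return the slice after it, or an empty list when 'es' is absent.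
import Mathlib
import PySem

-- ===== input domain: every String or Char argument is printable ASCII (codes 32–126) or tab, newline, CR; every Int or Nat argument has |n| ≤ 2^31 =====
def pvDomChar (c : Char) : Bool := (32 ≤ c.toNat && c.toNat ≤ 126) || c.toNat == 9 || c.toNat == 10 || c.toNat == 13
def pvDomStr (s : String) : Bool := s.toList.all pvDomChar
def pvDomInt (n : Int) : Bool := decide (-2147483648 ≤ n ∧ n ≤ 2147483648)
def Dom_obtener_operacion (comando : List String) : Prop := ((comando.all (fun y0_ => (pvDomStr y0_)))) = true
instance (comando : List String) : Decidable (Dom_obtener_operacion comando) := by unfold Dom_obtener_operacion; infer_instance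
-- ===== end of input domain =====

-- B replaces A's flag-accumulator loop with an idiomatic locate-then-slice: index of the first "es", then the tail slice after it.

-- ===== PORT A =====
-- for x in comando: if encontrado: lista.append(x); if x == "es": encontrado = True
def obtenerStepA (st : Bool × List String) (x : String) : Bool × List String :=
  let lista := if st.1 then st.2 ++ [x] else st.2
  let encontrado := if x == "es" then true else st.1
  (encontrado, lista)

def obtener_operacion (comando : List String) : List String :=
  (comando.foldl obtenerStepA (false, [])).2

-- ===== PORT B =====
-- lst = list(comando); if "es" in lst: return lst[lst.index("es")+1:]; return []
def obtener_operacion_alt (comando : List String) : List String :=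
  if "es" ∈ comando then
    match PySem.List.index? comando "es" with
    | some i => PySem.List.slice comando (some ((i : Int) + 1)) none
    | none => []
  else []

-- ===== PRECONDITION & SPEC =====
def Spec_obtener_operacion (comando : List String) (out : List String) : Prop := out = obtener_operacion_alt comando
instance (comando : List String) (out : List String) : Decidable (Spec_obtener_operacion comando out) := by unfold Spec_obtener_operacion; infer_instance

-- ===== CLAIM (what is proved, stated in full; the proofs are below) =====
def Claim_equal_obtener_operacion : Prop := ∀ (comando : List String), Dom_obtener_operacion comando → Spec_obtener_operacion comando (obtener_operacion comando)

-- ===== LEMMAS AND PROOFS =====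

lemma obtener_step_true (xs acc : List String) :
    xs.foldl obtenerStepA (true, acc) = (true, acc ++ xs) := by
  induction xs generalizing acc with
  | nil => simp
  | cons x xs ih =>
    rw [List.foldl_cons, show obtenerStepA (true, acc) x = (true, acc ++ [x]) from by
      simp [obtenerStepA], ih]
    simp

lemma alt_cons_es (xs : List String) : obtener_operacion_alt ("es" :: xs) = xs := by
  have h : PySem.List.index? ("es" :: xs) "es" = some 0 := by
    simp [List.idxOf?_cons]
  simp only [obtener_operacion_alt, if_pos (List.mem_cons_self), h]
  norm_num [PySem.List.slice_from_one]

lemma alt_cons_ne (x : String) (xs : List String) (hx : x ≠ "es") :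
    obtener_operacion_alt (x :: xs) = obtener_operacion_alt xs := by
  unfold obtener_operacion_alt
  by_cases hm : "es" ∈ xs
  · obtain ⟨i, hi⟩ := Option.isSome_iff_exists.mp
      (by rw [PySem.List.index?_isSome_iff]; exact hm : (PySem.List.index? xs "es").isSome)
    have hcons : PySem.List.index? (x :: xs) "es" = some (i + 1) := by
      simp only [PySem.List.index?_eq_idxOf?] at hi ⊢
      rw [List.idxOf?_cons, if_neg (by simpa using Ne.symm hx ∘ Eq.symm), hi]; rfl
    have hmem : "es" ∈ x :: xs := List.mem_cons_of_mem _ hm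
    simp only [if_pos hm, if_pos hmem, hcons, hi]
    have h1 : (((i + 1 : ℕ) : Int)) + 1 = (((i + 2 : ℕ) : Int)) := by push_cast; ring
    have h2 : (((i : ℕ) : Int) + 1) = (((i + 1 : ℕ) : Int)) := by push_cast; ring
    rw [h1, h2, PySem.List.slice_from_natCast, PySem.List.slice_from_natCast]
    simp
  · have hmem : "es" ∉ x :: xs := by simp [hm, Ne.symm hx]
    simp [hm, hmem]

lemma foldl_false_eq_alt (xs acc : List String) :
    (xs.foldl obtenerStepA (false, acc)).2 = acc ++ obtener_operacion_alt xs := by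
  induction xs generalizing acc with
  | nil => simp [obtener_operacion_alt]
  | cons x xs ih =>
    by_cases hx : x = "es"
    · subst hx
      rw [List.foldl_cons, show obtenerStepA (false, acc) "es" = (true, acc) from by
        simp [obtenerStepA], obtener_step_true, alt_cons_es]
    · rw [List.foldl_cons, show obtenerStepA (false, acc) x = (false, acc) from by
        simp [obtenerStepA, hx], ih, alt_cons_ne x xs hx]

-- ===== VERDICT (by name: the statement is the Claim_ definition above) =====
theorem obtener_operacion_spec : Claim_equal_obtener_operacion := by
  intro comando _
  unfold Spec_obtener_operacion obtener_operacion
  simpa using foldl_false_eq_alt comando []
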